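-- pv_equiv track=rewrite | github.com/ParastooSJ/CER | scripts/retrieve_subgraph.py | final_output
-- ===== SOURCE A (Python) =====
-- def final_output(triples):
--     results = {}
--
--     for triple in triples:
--         objectt =  triple["object"].lower()
--         if  objectt not in results.keys():
--             results[objectt] =[]
--         results[objectt].append(triple)
--
--     return results
-- ===== SOURCE B (Python) =====
-- def final_output(triples):
--     keys = list(dict.fromkeys(t["object"].lower() for t in triples))
--     return {k: [t for t in triples if t["object"].lower() == k] for k in keys}
-- ===== Notes on version B (the rewrite author's own statement) =====
-- stated objective: alternative
-- what changed: B replaces A's incremental dict-building loop (setdefault-then-append per triple) by a two-phase comprehension: first the ordered-deduplicated list of lowercased object keys, then one filter pass per key.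
import Mathlib
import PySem

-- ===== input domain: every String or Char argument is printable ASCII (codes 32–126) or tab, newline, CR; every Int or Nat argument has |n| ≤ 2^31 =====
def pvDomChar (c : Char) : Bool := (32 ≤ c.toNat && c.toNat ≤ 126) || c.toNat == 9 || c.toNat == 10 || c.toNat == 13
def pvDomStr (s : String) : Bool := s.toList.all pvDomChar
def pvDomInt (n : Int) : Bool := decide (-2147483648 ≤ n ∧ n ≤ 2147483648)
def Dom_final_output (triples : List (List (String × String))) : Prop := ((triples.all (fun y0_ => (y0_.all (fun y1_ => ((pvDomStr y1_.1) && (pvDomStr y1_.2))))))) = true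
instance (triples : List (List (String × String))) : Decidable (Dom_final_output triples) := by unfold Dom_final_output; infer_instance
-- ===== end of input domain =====

-- B groups by first collecting the ordered-deduplicated lowercased keys and then filtering per key,
-- instead of A's incremental dict-building loop; same return value (alternative decomposition, not faster).

-- triple["object"]: first match in the association list (Python dicts have unique keys); "" never occurs under Pre_.
def pvObj (t : List (String × String)) : String :=
  ((t.find? (fun p => p.1 == "object")).map (·.2)).getD ""

-- ===== PORT A =====
def final_output (triples : List (List (String × String))) : List (String × List (List (String × String))) :=
  (triples.foldl
    (fun results triple =>
      let objectt := PySem.Str.lower (pvObj triple)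
      let results := if results.contains objectt then results else results.insert objectt []
      results.insert objectt (results.getD objectt [] ++ [triple]))
    (PySem.Dict.empty : PySem.Dict String (List (List (String × String))))).items

-- ===== PORT B =====
def final_output_alt (triples : List (List (String × String))) : List (String × List (List (String × String))) :=
  (PySem.List.dedup (triples.map (fun t => PySem.Str.lower (pvObj t)))).map
    (fun k => (k, triples.filter (fun t => PySem.Str.lower (pvObj t) == k)))

-- ===== PRECONDITION & SPEC =====
-- Pre_ excludes triples missing the "object" key, on which the Python A raises KeyError.
def Pre_final_output (triples : List (List (String × String))) : Prop :=
  ∀ t ∈ triples, (t.find? (fun p => p.1 == "object")).isSome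
instance (triples : List (List (String × String))) : Decidable (Pre_final_output triples) := by unfold Pre_final_output; infer_instance
def pvWitness_final_output : (List (List (String × String))) := ([[("object", "Ab")], [("object", "aB"), ("x", "y")]])
def Spec_final_output (triples : List (List (String × String))) (out : List (String × List (List (String × String)))) : Prop := out = final_output_alt triples
instance (triples : List (List (String × String))) (out : List (String × List (List (String × String)))) : Decidable (Spec_final_output triples out) := by unfold Spec_final_output; infer_instance

-- ===== CLAIM (what is proved, stated in full; the proofs are below) =====
def Claim_equal_final_output : Prop := ∀ (triples : List (List (String × String))), Dom_final_output triples → Pre_final_output triples → Spec_final_output triples (final_output triples)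

-- ===== LEMMAS AND PROOFS =====

-- A's loop body (setdefault-to-[] then overwrite with the appended list) is exactly Dict.modify.
theorem pv_step_eq_modify (res : PySem.Dict String (List (List (String × String))))
    (k : String) (t : List (String × String)) :
    (let res' := if res.contains k then res else res.insert k []
     res'.insert k (res'.getD k [] ++ [t])) = res.modify k [] (fun l => l ++ [t]) := by
  by_cases h : res.contains k = true
  · simp [h, PySem.Dict.modify, PySem.Dict.getD_eq_get?_getD]
  · have h' : res.contains k = false := by simpa using h
    simp [h', PySem.Dict.modify, PySem.Dict.getD_insert_self, PySem.Dict.insert_insert_self,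
      PySem.Dict.getD_of_not_contains res [] h']

theorem final_output_eq_modify_loop (triples : List (List (String × String))) :
    final_output triples =
      (triples.foldl (fun d t => d.modify (PySem.Str.lower (pvObj t)) [] (fun l => l ++ [t]))
        (PySem.Dict.empty : PySem.Dict String (List (List (String × String))))).items := by
  unfold final_output
  congr 1
  apply PySem.List.foldl_congr_mem
  intro d t _
  exact pv_step_eq_modify d _ t

-- ===== VERDICT (by name: the statement is the Claim_ definition above) =====
-- the modify-loop over triples is the pair-keyed modify-loop the library lemmas describe
theorem pv_loop_as_pairs (triples : List (List (String × String))) :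
    (triples.foldl (fun d t => d.modify (PySem.Str.lower (pvObj t)) [] (fun l => l ++ [t]))
        (PySem.Dict.empty : PySem.Dict String (List (List (String × String))))) =
      ((triples.map (fun t => (PySem.Str.lower (pvObj t), t))).foldl
        (fun d p => d.modify p.1 [] (fun l => l ++ [p.2])) PySem.Dict.empty) := by
  rw [List.foldl_map]

theorem final_output_spec : Claim_equal_final_output := by
  intro triples _ _
  unfold Spec_final_output final_output_alt
  rw [final_output_eq_modify_loop]
  set D := (triples.foldl (fun d t => d.modify (PySem.Str.lower (pvObj t)) [] (fun l => l ++ [t]))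
      (PySem.Dict.empty : PySem.Dict String (List (List (String × String))))) with hD
  have hnd : D.keys.Nodup := by
    rw [hD]
    exact PySem.Dict.nodup_keys_foldl_modify_key triples (fun t => PySem.Str.lower (pvObj t)) []
      (fun _ t l => l ++ [t]) _ (by simp [PySem.Dict.keys_empty])
  have hkeys : D.keys = PySem.List.dedup (triples.map (fun t => PySem.Str.lower (pvObj t))) := by
    rw [hD, PySem.Dict.keys_foldl_modify_key triples (fun t => PySem.Str.lower (pvObj t)) []
      (fun _ t l => l ++ [t]) _]
    simp [PySem.Dict.keys_empty, PySem.Set.update_nil_left]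
  have hval : ∀ k, D.getD k [] = triples.filter (fun t => PySem.Str.lower (pvObj t) == k) := by
    intro k
    rw [hD, pv_loop_as_pairs, PySem.Dict.getD_foldl_modify_append]
    simp [PySem.Dict.getD_empty, List.filter_map, Function.comp_def]
  rw [PySem.Dict.items_eq_map_keys D hnd [], hkeys]
  exact List.map_congr_left (fun k _ => by rw [hval k])
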